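-- pv_equiv track=rewrite | github.com/awilkins/advent | advent/day_15/ingredients.py | recipe_generator
-- ===== SOURCE A (Python) =====
-- from typing import Sequence, NamedTuple, List
--
-- class Ingredient(NamedTuple):
--     name: str
--     capacity: int
--     durability: int
--     flavour: int
--     texture: int
--     calories: int
--
-- def recipe_generator(ingredients: List[Ingredient], spoons=100, amounts=None):
--     amounts = amounts or []
--     max_spoons = (spoons - len(ingredients)) + 1
--     if len(ingredients) == 1:
--         recipe = amounts.copy()
--         recipe.append(spoons)
--         yield recipe
--         return
--
--     for s in range(1, max_spoons + 1):
--         amounts.append(s)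
--         yield from recipe_generator(ingredients[1:], spoons - s, amounts)
--         amounts.pop()
-- ===== SOURCE B (Python) =====
-- from itertools import combinations
-- from typing import List
--
-- def recipe_generator(ingredients, spoons=100, amounts=None):
--     prefix = list(amounts) if amounts else []
--     if not ingredients:
--         return
--     k = len(ingredients)
--     for cuts in combinations(range(1, spoons), k - 1):
--         bounds = (0,) + cuts + (spoons,)
--         yield prefix + [b - a for a, b in zip(bounds, bounds[1:])]
-- ===== Notes on version B (the rewrite author's own statement) =====
-- stated objective: faster
-- what changed: B replaces A's recursive generator (which re-branches per remaining spoon at every level) by a single pass over itertools.combinations of the internal cut points, turning each increasing cut tuple into the part sizes by adjacent differences; this also removes A's exponential dead recursion on the empty ingredient list.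
import Mathlib
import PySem

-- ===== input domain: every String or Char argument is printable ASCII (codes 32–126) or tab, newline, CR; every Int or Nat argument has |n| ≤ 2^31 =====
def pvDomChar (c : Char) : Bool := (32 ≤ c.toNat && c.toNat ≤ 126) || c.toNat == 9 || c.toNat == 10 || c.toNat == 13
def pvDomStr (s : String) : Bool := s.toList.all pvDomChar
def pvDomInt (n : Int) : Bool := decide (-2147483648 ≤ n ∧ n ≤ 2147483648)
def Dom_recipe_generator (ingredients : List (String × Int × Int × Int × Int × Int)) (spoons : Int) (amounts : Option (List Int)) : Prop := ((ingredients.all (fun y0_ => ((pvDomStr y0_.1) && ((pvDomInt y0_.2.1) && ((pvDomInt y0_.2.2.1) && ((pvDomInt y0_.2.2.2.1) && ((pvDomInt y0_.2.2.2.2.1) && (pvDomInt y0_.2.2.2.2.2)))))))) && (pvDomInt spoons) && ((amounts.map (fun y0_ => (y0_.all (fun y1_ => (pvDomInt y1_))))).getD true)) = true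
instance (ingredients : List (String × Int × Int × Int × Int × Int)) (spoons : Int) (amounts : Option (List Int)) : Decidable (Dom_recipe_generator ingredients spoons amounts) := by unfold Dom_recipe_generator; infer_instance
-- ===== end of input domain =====

-- B enumerates the same recipes from itertools-style combinations of cut points instead of A's
-- recursive per-spoon branching generator; return-value equivalence only (A transiently mutates
-- `amounts` while consumed, restoring it; B never mutates it).


-- ===== PORT A =====
-- recursive generator, collected into the list of yielded recipes in yield order;
-- 'amounts.append(s) … amounts.pop()' is passing 'amounts ++ [s]' to the recursive call
def recGoA (ings : List (String × Int × Int × Int × Int × Int)) (spoons : Int) (amounts : List Int) : List (List Int) :=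
  let max_spoons := spoons - ings.length + 1
  if ings.length = 1 then
    [amounts ++ [spoons]]
  else
    (PySem.List.pyRange 1 (max_spoons + 1) 1).attach.flatMap
      (fun s => recGoA ings.tail (spoons - s.1) (amounts ++ [s.1]))
termination_by ings.length + (spoons + 2).toNat
decreasing_by
  have h := PySem.List.mem_pyRange_one.mp s.2
  cases ings with
  | nil => simp only [List.tail_nil, List.length_nil] at h ⊢; omega
  | cons x t => simp only [List.tail_cons, List.length_cons] at h ⊢; omega

-- 'amounts = amounts or []' : None and [] both become []
def recipe_generator (ingredients : List (String × Int × Int × Int × Int × Int)) (spoons : Int) (amounts : Option (List Int)) : List (List Int) :=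
  recGoA ingredients spoons (amounts.getD [])

-- ===== PORT B =====
-- itertools.combinations(l, r) in its lexicographic yield order
def combosB : List Int → Nat → List (List Int)
  | _, 0 => [[]]
  | [], _ + 1 => []
  | x :: xs, r + 1 => (combosB xs r).map (fun c => x :: c) ++ combosB xs (r + 1)

def recipe_generator_alt (ingredients : List (String × Int × Int × Int × Int × Int)) (spoons : Int) (amounts : Option (List Int)) : List (List Int) :=
  let pfx := amounts.getD []
  if ingredients = [] then []
  else
    (combosB (PySem.List.pyRange 1 spoons 1) (ingredients.length - 1)).map
      (fun cuts => pfx ++ List.zipWith (fun a b => b - a) (0 :: cuts) (cuts ++ [spoons]))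

-- ===== PRECONDITION & SPEC =====
def Spec_recipe_generator (ingredients : List (String × Int × Int × Int × Int × Int)) (spoons : Int) (amounts : Option (List Int)) (out : List (List Int)) : Prop := out = recipe_generator_alt ingredients spoons amounts
instance (ingredients : List (String × Int × Int × Int × Int × Int)) (spoons : Int) (amounts : Option (List Int)) (out : List (List Int)) : Decidable (Spec_recipe_generator ingredients spoons amounts out) := by unfold Spec_recipe_generator; infer_instance

-- ===== CLAIM (what is proved, stated in full; the proofs are below) =====
def Claim_equal_recipe_generator : Prop := ∀ (ingredients : List (String × Int × Int × Int × Int × Int)) (spoons : Int) (amounts : Option (List Int)), Dom_recipe_generator ingredients spoons amounts → Spec_recipe_generator ingredients spoons amounts (recipe_generator ingredients spoons amounts)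

-- ===== LEMMAS AND PROOFS =====

-- ascending integer range as a mapped Nat range
def irange (a : Int) (n : Nat) : List Int := (List.range n).map (fun i : Nat => a + i)

theorem irange_succ (a : Int) (n : Nat) : irange a (n + 1) = a :: irange (a + 1) n := by
  simp only [irange, List.range_succ_eq_map, List.map_cons, List.map_map, Nat.cast_zero, add_zero]
  refine congrArg _ (List.map_congr_left fun j _ => ?_)
  simp [Function.comp_apply, Nat.succ_eq_add_one]
  ring

def partsB (cuts : List Int) (spoons : Int) : List Int :=
  List.zipWith (fun a b => b - a) (0 :: cuts) (cuts ++ [spoons])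

theorem irange_add (a s : Int) (n : Nat) :
    (irange a n).map (fun c => c + s) = irange (a + s) n := by
  simp only [irange, List.map_map]
  refine List.map_congr_left fun j _ => ?_
  simp [Function.comp_apply]; ring

theorem pyRange_eq_irange (a b : Int) :
    PySem.List.pyRange a b 1 = irange a (b - a).toNat := by
  generalize h : (b - a).toNat = n
  induction n generalizing a with
  | zero => rw [PySem.List.pyRange_one_eq_nil (by omega)]; simp [irange]
  | succ n ih =>
      rw [PySem.List.pyRange_one_cons (by omega), ih (a+1) (by omega), irange_succ]

theorem recGoA_nil (spoons : Int) (amounts : List Int) : recGoA [] spoons amounts = [] := by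
  generalize h : (spoons + 2).toNat = n
  induction n using Nat.strong_induction_on generalizing spoons amounts with
  | _ n ih =>
      rw [recGoA]
      simp only [List.length_nil]
      rw [if_neg (by decide)]
      refine List.flatMap_eq_nil_iff.mpr fun s hs => ?_
      simp only [List.mem_attach, List.tail_nil] at *
      obtain ⟨s, hs⟩ := s
      have hm := PySem.List.mem_pyRange_one.mp hs
      exact ih (spoons - s + 2).toNat (by omega) _ _ rfl

theorem combosB_map (l : List Int) (f : Int → Int) (r : Nat) :
    combosB (l.map f) r = (combosB l r).map (List.map f) := by
  induction l generalizing r with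
  | nil => cases r <;> simp [combosB]
  | cons x xs ih =>
      cases r with
      | zero => simp [combosB]
      | succ r => simp [combosB, ih, List.map_map, Function.comp]

theorem combosB_short (l : List Int) (r : Nat) (h : l.length < r) : combosB l r = [] := by
  induction l generalizing r with
  | nil => cases r with
      | zero => omega
      | succ r => rfl
  | cons x xs ih =>
      cases r with
      | zero => omega
      | succ r =>
          simp only [combosB, List.append_eq_nil_iff, List.map_eq_nil_iff]
          exact ⟨ih r (by simp at h ⊢; omega), ih (r+1) (by simp at h ⊢; omega)⟩

theorem combosB_decomp (n : Nat) (k : Nat) (a : Int) :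
    combosB (irange a n) (k + 1)
      = (List.range n).flatMap
          (fun (i : Nat) => (combosB (irange (a + (i : Int) + 1) ((n - i - 1 : Nat))) k).map (fun c => (a + (i : Int)) :: c)) := by
  induction n generalizing a with
  | zero => simp [irange, combosB]
  | succ n ih =>
      rw [irange_succ, List.range_succ_eq_map]
      simp only [combosB, List.flatMap_cons, List.flatMap_map]
      congr 1
      · simp
      · rw [ih (a + 1)]
        refine congrArg (List.range n).flatMap (funext fun i => ?_)
        have e1 : (n + 1 - Nat.succ i - 1 : Nat) = n - i - 1 := by omega
        have e2 : a + (Nat.succ i : Int) + 1 = a + 1 + (i : Int) + 1 := by push_cast; ring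
        have e3 : a + (Nat.succ i : Int) = a + 1 + (i : Int) := by push_cast; ring
        rw [e1, e2, e3]

theorem zip_shift (spoons : Int) (l : List Int) (x s : Int) :
    List.zipWith (fun a b => b - a) ((x + s) :: l.map (fun c => c + s)) (l.map (fun c => c + s) ++ [spoons])
      = List.zipWith (fun a b => b - a) (x :: l) (l ++ [spoons - s]) := by
  induction l generalizing x with
  | nil => simp; ring
  | cons c rest ih =>
      simp only [List.map_cons, List.cons_append, List.zipWith_cons_cons]
      rw [ih c]
      congr 1
      ring

theorem partsB_shift (cuts : List Int) (s spoons : Int) :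
    partsB (s :: cuts.map (fun c => c + s)) spoons = s :: partsB cuts (spoons - s) := by
  simp only [partsB, List.cons_append, List.zipWith_cons_cons, sub_zero]
  congr 1
  have := zip_shift spoons cuts 0 s
  simpa using this

theorem recGoA_main (k : Nat) (ings : List (String × Int × Int × Int × Int × Int))
    (spoons : Int) (amounts : List Int) (hlen : ings.length = k + 1) :
    recGoA ings spoons amounts
      = (combosB (irange 1 (spoons - 1).toNat) k).map
          (fun cuts => amounts ++ partsB cuts spoons) := by
  induction k generalizing ings spoons amounts with
  | zero =>
      rw [recGoA, if_pos hlen]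
      simp [combosB, partsB]
  | succ k ih =>
      rw [recGoA, if_neg (by omega)]
      have hb : spoons - (ings.length : Int) + 1 + 1 = spoons - k := by rw [hlen]; push_cast; ring
      rw [show ((PySem.List.pyRange 1 (spoons - (ings.length : Int) + 1 + 1) 1).attach.flatMap
            (fun s => recGoA ings.tail (spoons - s.1) (amounts ++ [s.1])))
          = (PySem.List.pyRange 1 (spoons - (ings.length : Int) + 1 + 1) 1).flatMap
            (fun s => recGoA ings.tail (spoons - s) (amounts ++ [s])) from by simp]
      rw [hb, pyRange_eq_irange]
      set m1 : Nat := (spoons - (k : Int) - 1).toNat with hm1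
      set m : Nat := (spoons - 1).toNat with hm
      have htail : ings.tail.length = k + 1 := by
        cases ings with
        | nil => simp at hlen
        | cons x t => simp at hlen ⊢; omega
      -- left side: apply the induction hypothesis under the loop
      rw [List.flatMap_congr (fun s _ => ih ings.tail (spoons - s) (amounts ++ [s]) htail)]
      rw [irange, List.flatMap_map]
      -- right side: decompose the combinations by their first cut point
      rw [combosB_decomp m k 1, List.map_flatMap]
      have hr : List.range m = List.range m1 ++ (List.range (m - m1)).map (fun x => m1 + x) := by
        rw [← List.range_add]; congr 1; omega
      rw [hr, List.flatMap_append]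
      have hnil : (((List.range (m - m1)).map (fun x => m1 + x)).flatMap
          (fun i : Nat => ((combosB (irange (1 + (i : Int) + 1) ((m - i - 1 : Nat))) k).map
            (fun c => (1 + (i : Int)) :: c)).map (fun cuts => amounts ++ partsB cuts spoons))) = [] := by
        refine List.flatMap_eq_nil_iff.mpr fun i hi => ?_
        simp only [List.mem_map, List.mem_range] at hi
        obtain ⟨j, hj, rfl⟩ := hi
        rw [combosB_short _ _ (by simp [irange]; omega)]
        simp
      rw [hnil, List.append_nil]
      refine List.flatMap_congr fun i hi => ?_
      have him : i < m1 := List.mem_range.mp hi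
      rw [List.map_map]
      rw [show (1 + (i : Int) + 1) = 1 + (1 + (i : Int)) from by ring, ← irange_add, combosB_map,
        List.map_map]
      have etoNat : (spoons - (1 + (i : Int)) - 1).toNat = (m - i - 1 : Nat) := by omega
      rw [etoNat]
      refine List.map_congr_left fun cuts _ => ?_
      simp only [Function.comp_apply, partsB_shift]
      simp

-- ===== VERDICT (by name: the statement is the Claim_ definition above) =====
theorem recipe_generator_spec : Claim_equal_recipe_generator := by
  intro ings spoons amounts _
  unfold Spec_recipe_generator recipe_generator recipe_generator_alt
  cases ings with
  | nil => simp [recGoA_nil]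
  | cons x t =>
      have h := recGoA_main t.length (x :: t) spoons (amounts.getD []) (by simp)
      rw [h, pyRange_eq_irange]
      simp [partsB]
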